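-- pv_equiv track=rewrite | github.com/silverkong/Baekjoon | 프로그래머스/unrated/132265. 롤케이크 자르기/롤케이크 자르기.py | solution
-- ===== SOURCE A (Python) =====
-- from collections import Counter
--
-- def solution(topping):
--     answer = 0
--     cake_top = Counter(topping)
--     cake_top2 = set()
--
--     for top in topping:
--         cake_top[top] -= 1
--         cake_top2.add(top)
--         if cake_top[top] == 0:
--             cake_top.pop(top)
--         if len(cake_top) == len(cake_top2):
--             answer += 1
--
--     return answer
-- ===== SOURCE B (Python) =====
-- def solution(topping):
--     # Pass 1: right_distinct[k] = number of distinct values in topping[k:].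
--     right_distinct = [0]
--     suffix_values = set()
--     for top in reversed(topping):
--         suffix_values.add(top)
--         right_distinct.append(len(suffix_values))
--     right_distinct.reverse()
--     # Pass 2: sweep left to right with the set of values seen so far.
--     answer = 0
--     seen = set()
--     i = 0
--     for top in topping:
--         seen.add(top)
--         i += 1
--         if len(seen) == right_distinct[i]:
--             answer += 1
--     return answer
-- ===== Notes on version B (the rewrite author's own statement) =====
-- stated objective: alternative
-- what changed: A fuses everything into one pass that mutates a global Counter (decrement, prune zero-count keys) while growing a seen-set; B decomposes the task into two independent passes: a right-to-left precomputed suffix-distinct-count table, then a left-to-right sweep comparing the seen-set size against the table.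
import Mathlib
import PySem

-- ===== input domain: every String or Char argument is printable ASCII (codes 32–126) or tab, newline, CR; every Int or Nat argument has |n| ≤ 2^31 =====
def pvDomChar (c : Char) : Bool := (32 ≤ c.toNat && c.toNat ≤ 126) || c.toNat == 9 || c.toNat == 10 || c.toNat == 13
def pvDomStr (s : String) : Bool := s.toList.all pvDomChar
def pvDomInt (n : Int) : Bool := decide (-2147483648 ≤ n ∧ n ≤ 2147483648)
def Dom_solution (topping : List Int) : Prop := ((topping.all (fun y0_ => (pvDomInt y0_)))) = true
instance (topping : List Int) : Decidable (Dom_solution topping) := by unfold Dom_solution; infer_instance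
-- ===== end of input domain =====

-- B replaces A's single fused pass (global Counter decremented and pruned in place) by two
-- independent passes: a right-to-left precomputed suffix-distinct table, then a left-to-right
-- sweep with a seen-set; same cost class, different decomposition (objective: alternative).

-- ===== PORT A =====
-- loop body of A's for-loop; state = (answer, cake_top, cake_top2)
def stepA (st : Int × PySem.Dict Int Int × PySem.Set Int) (top : Int) :
    Int × PySem.Dict Int Int × PySem.Set Int :=
  let cakeTop := st.2.1.modify top 0 (· - 1)      -- cake_top[top] -= 1  (Counter default 0)
  let cakeTop2 := PySem.Set.add st.2.2 top        -- cake_top2.add(top)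
  -- if cake_top[top] == 0: cake_top.pop(top)  (key is present here, so pop = erase)
  let cakeTop := if cakeTop.getD top 0 = 0 then cakeTop.erase top else cakeTop
  let answer := if (cakeTop.size : Int) = PySem.Set.len cakeTop2 then st.1 + 1 else st.1
  (answer, cakeTop, cakeTop2)

def solution (topping : List Int) : Int :=
  (topping.foldl stepA (0, PySem.Dict.counter topping, (PySem.Set.empty : PySem.Set Int))).1

-- ===== PORT B =====
-- pass 1 loop body: state = (right_distinct, suffix_values)
def stepR (p : List Int × PySem.Set Int) (top : Int) : List Int × PySem.Set Int :=
  let sv := PySem.Set.add p.2 top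
  (p.1 ++ [PySem.Set.len sv], sv)

-- pass 2 loop body: state = (answer, seen, i); rd is the reversed right_distinct table
def stepB (rd : List Int) (st : Int × PySem.Set Int × Int) (top : Int) :
    Int × PySem.Set Int × Int :=
  let seen := PySem.Set.add st.2.1 top
  let i := st.2.2 + 1
  -- right_distinct[i]: i is always in range, so pyGetD with default 0 is exact here
  ((if PySem.Set.len seen = PySem.List.pyGetD rd i 0 then st.1 + 1 else st.1), seen, i)

def solution_alt (topping : List Int) : Int :=
  let build := topping.reverse.foldl stepR ([0], (PySem.Set.empty : PySem.Set Int))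
  let rightDistinct := build.1.reverse
  (topping.foldl (stepB rightDistinct) (0, (PySem.Set.empty : PySem.Set Int), 0)).1

-- ===== PRECONDITION & SPEC =====
def Spec_solution (topping : List Int) (out : Int) : Prop := out = solution_alt topping
instance (topping : List Int) (out : Int) : Decidable (Spec_solution topping out) := by
  unfold Spec_solution; infer_instance

-- ===== CLAIM (what is proved, stated in full; the proofs are below) =====
def Claim_equal_solution : Prop := ∀ (topping : List Int), Dom_solution topping → Spec_solution topping (solution topping)

-- ===== LEMMAS AND PROOFS =====

-- number of distinct values of a list (the abstraction both programs track)
def dcount (l : List Int) : Nat := l.toFinset.card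

-- common reference count: positions where distinct(prefix incl. current) = distinct(rest)
def specCount (s : PySem.Set Int) (l : List Int) : Int :=
  match l with
  | [] => 0
  | x :: xs =>
      (if (((PySem.Set.add s x).length : Nat) : Int) = ((dcount xs : Nat) : Int) then 1 else 0)
        + specCount (PySem.Set.add s x) xs

lemma find?_filter_key (l : List (Int × Int)) (k v : Int) :
    List.find? (fun p => p.1 == v) (l.filter (fun p => !(p.1 == k)))
      = if v = k then none else List.find? (fun p => p.1 == v) l := by
  induction l with
  | nil => simp
  | cons h t ih =>
      by_cases hk : h.1 = k
      · rw [show (h :: t).filter (fun p => !(p.1 == k)) = t.filter (fun p => !(p.1 == k)) by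
            simp [hk], ih]
        by_cases hv : v = k
        · simp [hv]
        · have hf : (h.1 == v) = false := by simp [hk]; omega
          simp [hv, hf]
      · rw [show (h :: t).filter (fun p => !(p.1 == k))
              = h :: t.filter (fun p => !(p.1 == k)) by simp [hk]]
        by_cases hv : h.1 = v
        · have hvk : ¬ v = k := by omega
          simp [hv, hvk]
        · have hf : (h.1 == v) = false := by simp [hv]
          simp only [List.find?_cons, hf]
          exact ih

lemma getD_erase (d : PySem.Dict Int Int) (k v : Int) :
    (d.erase k).getD v 0 = if v = k then 0 else d.getD v 0 := by
  simp only [PySem.Dict.erase, PySem.Dict.getD, PySem.Dict.get?, find?_filter_key]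
  split <;> simp

lemma keys_erase (d : PySem.Dict Int Int) (k : Int) :
    (d.erase k).keys = d.keys.filter (fun x => !(x == k)) := by
  simp only [PySem.Dict.erase, PySem.Dict.keys]
  induction d.items with
  | nil => simp
  | cons h t ih => by_cases hk : h.1 = k <;> simp [hk, ih]

lemma size_eq_dcount (d : PySem.Dict Int Int) (l : List Int)
    (hn : d.keys.Nodup) (hm : ∀ v, d.contains v = true ↔ v ∈ l) :
    d.size = dcount l := by
  have hsz : d.size = d.keys.length := by
    simp [PySem.Dict.size, PySem.Dict.keys]
  have hfin : d.keys.toFinset = l.toFinset := by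
    ext v
    simp only [List.mem_toFinset]
    rw [← PySem.Dict.contains_iff_mem_keys]
    exact hm v
  rw [hsz, ← List.toFinset_card_of_nodup hn, hfin, dcount]

lemma nodup_keys_modify (d : PySem.Dict Int Int) (k : Int) (d0 : Int) (f : Int → Int)
    (hn : d.keys.Nodup) : (d.modify k d0 f).keys.Nodup := by
  rw [PySem.Dict.keys_modify]
  by_cases hc : d.contains k
  · rw [PySem.Dict.keys_insert_of_contains _ _ hc]; exact hn
  · rw [PySem.Dict.keys_insert_of_not_contains _ _ (by simpa using hc)]
    have hnk : k ∉ d.keys := fun h => hc ((PySem.Dict.contains_iff_mem_keys d k).mpr h)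
    simp [List.nodup_append, hn]
    exact fun a ha hak => hnk (hak ▸ ha)

-- A's loop: if the Counter currently holds exactly the multiplicities of the not-yet-processed
-- suffix l, the remaining iterations add specCount s l to the answer.
lemma A_loop : ∀ (l : List Int) (d : PySem.Dict Int Int) (s : PySem.Set Int) (a : Int),
    d.keys.Nodup → (∀ v, d.getD v 0 = ((l.count v : Nat) : Int)) →
    (∀ v, d.contains v = true ↔ v ∈ l) →
    (l.foldl stepA (a, d, s)).1 = a + specCount s l := by
  intro l
  induction l with
  | nil =>
      intro d s a _ _ _
      show a = a + specCount s []
      rw [show specCount s [] = 0 from rfl]; ring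
  | cons top rest ih =>
      intro d s a hn hc hm
      have hd1 : ∀ v, (d.modify top 0 (· - 1)).getD v 0 = ((rest.count v : Nat) : Int) := by
        intro v
        rw [PySem.Dict.getD_modify]
        by_cases hv : v = top
        · subst hv; rw [if_pos rfl, hc]; simp
        · rw [if_neg hv, hc]
          simp only [List.count_cons]
          have : ¬ top = v := by omega
          simp [this]
      have hn1 : (d.modify top 0 (· - 1)).keys.Nodup := nodup_keys_modify d top 0 _ hn
      have hm1 : ∀ v, (d.modify top 0 (· - 1)).contains v = true ↔ v = top ∨ v ∈ rest := by
        intro v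
        rw [PySem.Dict.contains_modify]
        constructor
        · intro h
          rcases Bool.or_eq_true_iff.mp h with h | h
          · exact Or.inl (by simpa using h)
          · rcases List.mem_cons.mp ((hm v).mp h) with h | h
            · exact Or.inl h
            · exact Or.inr h
        · rintro (h | h)
          · subst h; simp
          · exact Bool.or_eq_true_iff.mpr (Or.inr ((hm v).mpr (List.mem_cons_of_mem _ h)))
      set d1 := d.modify top 0 (· - 1) with hd1def
      set d2 := if d1.getD top 0 = 0 then d1.erase top else d1 with hd2def
      have hn2 : d2.keys.Nodup := by
        rw [hd2def]; split
        · rw [keys_erase]; exact hn1.filter _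
        · exact hn1
      have hc2 : ∀ v, d2.getD v 0 = ((rest.count v : Nat) : Int) := by
        intro v
        rw [hd2def]; split
        · rename_i h0
          rw [getD_erase]
          by_cases hv : v = top
          · rw [if_pos hv]
            have h1 := hd1 top
            rw [h0] at h1
            rw [hv]
            exact h1
          · rw [if_neg hv]; exact hd1 v
        · exact hd1 v
      have hm2 : ∀ v, d2.contains v = true ↔ v ∈ rest := by
        intro v
        rw [hd2def]; split
        · rename_i h0
          have htop : (rest.count top : Int) = 0 := by rw [← hd1 top, h0]
          have htopn : top ∉ rest := by
            rw [← List.count_eq_zero]; exact_mod_cast htop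
          rw [PySem.Dict.contains_iff_mem_keys, keys_erase, List.mem_filter]
          constructor
          · rintro ⟨hk, hne⟩
            have : v = top ∨ v ∈ rest :=
              (hm1 v).mp ((PySem.Dict.contains_iff_mem_keys d1 v).mpr hk)
            rcases this with h | h
            · exfalso; rw [h] at hne; simp at hne
            · exact h
          · intro hv
            refine ⟨(PySem.Dict.contains_iff_mem_keys d1 v).mp ((hm1 v).mpr (Or.inr hv)), ?_⟩
            simp only [Bool.not_eq_eq_eq_not, Bool.not_true, beq_eq_false_iff_ne, ne_eq]
            intro h; subst h; exact htopn hv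
        · rename_i h0
          have : top ∈ rest := by
            by_contra htopn
            have : rest.count top = 0 := List.count_eq_zero.mpr htopn
            exact h0 (by rw [hd1 top, this]; simp)
          constructor
          · intro h
            rcases (hm1 v).mp h with h | h
            · subst h; exact this
            · exact h
          · intro h; exact (hm1 v).mpr (Or.inr h)
      have hsz : d2.size = dcount rest := size_eq_dcount d2 rest hn2 hm2
      show (rest.foldl stepA (stepA (a, d, s) top)).1 = a + specCount s (top :: rest)
      have hstep : stepA (a, d, s) top =
          ((if ((d2.size : Nat) : Int) = PySem.Set.len (PySem.Set.add s top) then a + 1 else a),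
            d2, PySem.Set.add s top) := rfl
      rw [hstep, ih d2 (PySem.Set.add s top) _ hn2 hc2 hm2, hsz, PySem.Set.len_eq]
      rw [show specCount s (top :: rest)
            = (if (((PySem.Set.add s top).length : Nat) : Int) = ((dcount rest : Nat) : Int)
                then (1 : Int) else 0) + specCount (PySem.Set.add s top) rest from rfl]
      by_cases hcnd : ((dcount rest : Nat) : Int) = (((PySem.Set.add s top).length : Nat) : Int)
      · rw [if_pos hcnd, if_pos hcnd.symm]; ring
      · rw [if_neg hcnd, if_neg (fun h => hcnd h.symm)]; ring

-- pass 1 of B unrolled: it appends one suffix-distinct entry per processed element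
lemma build_loop : ∀ (r : List Int) (acc : List Int) (s : PySem.Set Int),
    r.foldl stepR (acc, s)
      = (acc ++ (List.range r.length).map
            (fun j => PySem.Set.len (PySem.Set.update s (r.take (j + 1)))),
          PySem.Set.update s r) := by
  intro r
  induction r with
  | nil => intro acc s; simp [PySem.Set.update]
  | cons x xs ih =>
      intro acc s
      have hupd : ∀ l, PySem.Set.update s (x :: l) = PySem.Set.update (PySem.Set.add s x) l := by
        intro l; simp [PySem.Set.update]
      show xs.foldl stepR (stepR (acc, s) x) = _
      rw [show stepR (acc, s) x = (acc ++ [PySem.Set.len (PySem.Set.add s x)], PySem.Set.add s x)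
            from rfl,
         ih]
      simp only [List.length_cons, List.range_succ_eq_map, List.map_cons, List.map_map,
        Prod.mk.injEq]
      constructor
      · have h0 : PySem.Set.update s (List.take (0 + 1) (x :: xs)) = PySem.Set.add s x := by
          simp [PySem.Set.update, List.take]
        rw [h0]
        have hmap : (List.range xs.length).map
              ((fun j => PySem.Set.len (PySem.Set.update s (List.take (j + 1) (x :: xs))))
                ∘ Nat.succ)
            = (List.range xs.length).map
              (fun j => PySem.Set.len
                  (PySem.Set.update (PySem.Set.add s x) (List.take (j + 1) xs))) := by
          apply List.map_congr_left
          intro j _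
          simp only [Function.comp_def, Nat.succ_eq_add_one, List.take_succ_cons, hupd]
        rw [hmap]
        simp [List.append_assoc]
      · exact (hupd xs).symm

lemma length_ofList (m : List Int) : (PySem.Set.ofList m).length = m.toFinset.card := by
  rw [← List.toFinset_card_of_nodup (PySem.Set.nodup_ofList m)]
  congr 1
  ext v
  simp [PySem.Set.mem_ofList]

-- the reversed table of pass 1 lists the suffix-distinct counts left to right
lemma rd_eq (t : List Int) :
    ((t.reverse.foldl stepR ([0], (PySem.Set.empty : PySem.Set Int))).1).reverse
      = (List.range (t.length + 1)).map (fun k => ((dcount (t.drop k) : Nat) : Int)) := by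
  have hfst : (t.reverse.foldl stepR ([0], (PySem.Set.empty : PySem.Set Int))).1
      = (List.range (t.length + 1)).map
          (fun m => ((dcount (t.drop (t.length - m)) : Nat) : Int)) := by
    rw [build_loop]
    have hup : ∀ l : List Int, PySem.Set.update (PySem.Set.empty : PySem.Set Int) l
        = PySem.Set.ofList l := by
      intro l; rw [PySem.Set.ofList_eq_foldl]; rfl
    simp only [List.length_reverse, hup]
    simp [List.range_succ_eq_map, List.map_map, Function.comp_def, PySem.Set.len_eq,
      length_ofList, List.take_reverse, dcount, List.toFinset_reverse]
  rw [hfst]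
  apply List.ext_getElem
  · simp
  · intro k h1 h2
    simp only [List.length_map, List.length_range] at h2
    rw [List.getElem_reverse]
    simp only [List.length_map, List.length_range, List.getElem_map, List.getElem_range]
    have hidx : t.length - (t.length + 1 - 1 - k) = k := by omega
    rw [hidx]

-- pass 2 of B: with a correct table, the remaining iterations add specCount of the suffix
lemma B_loop (t rd : List Int)
    (hrd : ∀ m : Nat, m ≤ t.length →
      PySem.List.pyGetD rd (m : Int) 0 = ((dcount (t.drop m) : Nat) : Int)) :
    ∀ (l pre : List Int), t = pre ++ l → ∀ (a : Int),
      (l.foldl (stepB rd) (a, PySem.Set.ofList pre, (pre.length : Int))).1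
        = a + specCount (PySem.Set.ofList pre) l := by
  intro l
  induction l with
  | nil => intro pre _ a; simp [specCount]
  | cons x xs ih =>
      intro pre ht a
      have hseen : PySem.Set.add (PySem.Set.ofList pre) x = PySem.Set.ofList (pre ++ [x]) := by
        rw [PySem.Set.ofList_eq_foldl, PySem.Set.ofList_eq_foldl, List.foldl_append]
        rfl
      have hlen : ((pre.length : Int) + 1) = (((pre ++ [x]).length : Nat) : Int) := by
        simp
      have hdrop : t.drop (pre.length + 1) = xs := by
        rw [ht, show pre ++ x :: xs = (pre ++ [x]) ++ xs by simp,
          show pre.length + 1 = (pre ++ [x]).length by simp, List.drop_left]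
      have hle : pre.length + 1 ≤ t.length := by
        rw [ht]; simp
      have hcond : PySem.List.pyGetD rd ((pre.length : Int) + 1) 0
          = ((dcount xs : Nat) : Int) := by
        have h1 : ((pre.length : Int) + 1) = ((pre.length + 1 : Nat) : Int) := by push_cast; ring
        rw [h1, hrd _ hle, hdrop]
      show (xs.foldl (stepB rd) (stepB rd (a, PySem.Set.ofList pre, (pre.length : Int)) x)).1 = _
      have hstep : stepB rd (a, PySem.Set.ofList pre, (pre.length : Int)) x
          = ((if (((PySem.Set.add (PySem.Set.ofList pre) x).length : Nat) : Int)
                = ((dcount xs : Nat) : Int) then a + 1 else a),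
             PySem.Set.ofList (pre ++ [x]), (((pre ++ [x]).length : Nat) : Int)) := by
        simp only [stepB, hseen, PySem.Set.len_eq, hcond]
        rw [hlen]
      rw [hstep, ih (pre ++ [x]) (by simp [ht]) _, specCount, hseen]
      split <;> ring

-- ===== VERDICT (by name: the statement is the Claim_ definition above) =====
theorem solution_spec : Claim_equal_solution := by
  intro topping _
  unfold Spec_solution solution solution_alt
  have hA : (topping.foldl stepA
      (0, PySem.Dict.counter topping, (PySem.Set.empty : PySem.Set Int))).1
      = 0 + specCount PySem.Set.empty topping := by
    apply A_loop topping _ _ _ (PySem.Dict.nodup_keys_counter topping)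
    · intro v; rw [PySem.Dict.getD_counter]
    · intro v; rw [PySem.Dict.contains_counter]; simp
  have hrd : ∀ m : Nat, m ≤ topping.length →
      PySem.List.pyGetD
        ((topping.reverse.foldl stepR ([0], (PySem.Set.empty : PySem.Set Int))).1).reverse
        (m : Int) 0 = ((dcount (topping.drop m) : Nat) : Int) := by
    intro m hm
    rw [rd_eq, PySem.List.pyGetD_natCast,
      List.getD_eq_getElem _ _ (by simp; omega), List.getElem_map, List.getElem_range]
  have hB : (topping.foldl
      (stepB ((topping.reverse.foldl stepR ([0], (PySem.Set.empty : PySem.Set Int))).1).reverse)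
      (0, (PySem.Set.empty : PySem.Set Int), 0)).1
      = 0 + specCount PySem.Set.empty topping := by
    have := B_loop topping _ hrd topping [] rfl 0
    simpa [PySem.Set.ofList, PySem.Set.empty] using this
  simp only [hA, hB]
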